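-- pv_equiv track=rewrite | github.com/AxelBlazerGit/DSA | GfG/medium/Rotate and delete.py | rotateDelete
-- ===== SOURCE A (Python) =====
-- def rotateDelete(arr):
--     # code here
--     cur=1
--     n=len(arr)
--     while cur<n//2+1:
--         temp=arr.pop()
--         arr.insert(0, temp)
--         arr.pop(-cur)
--         cur += 1
--     return arr[0]
-- ===== SOURCE B (Python) =====
-- def rotateDelete(arr):
--     # O(n): track the surviving position backwards through the rotate/delete
--     # steps instead of mutating the list (A mutates arr in place; B does not —
--     # the equivalence is about the return value).
--     n = len(arr)
--     p = 0
--     for cur in range(n // 2, 0, -1):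
--         if p == 0:
--             p = n - cur
--         elif p <= n - 2 * cur:
--             p -= 1
--     return arr[p]
-- ===== Notes on version B (the rewrite author's own statement) =====
-- stated objective: faster
-- what changed: B replaces A's O(n^2) list mutation (pop/insert/pop per step) by a backward Josephus-style recurrence on the surviving index, then does a single list access; A also mutates arr in place, B does not (return value is what is compared).
import Mathlib
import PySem

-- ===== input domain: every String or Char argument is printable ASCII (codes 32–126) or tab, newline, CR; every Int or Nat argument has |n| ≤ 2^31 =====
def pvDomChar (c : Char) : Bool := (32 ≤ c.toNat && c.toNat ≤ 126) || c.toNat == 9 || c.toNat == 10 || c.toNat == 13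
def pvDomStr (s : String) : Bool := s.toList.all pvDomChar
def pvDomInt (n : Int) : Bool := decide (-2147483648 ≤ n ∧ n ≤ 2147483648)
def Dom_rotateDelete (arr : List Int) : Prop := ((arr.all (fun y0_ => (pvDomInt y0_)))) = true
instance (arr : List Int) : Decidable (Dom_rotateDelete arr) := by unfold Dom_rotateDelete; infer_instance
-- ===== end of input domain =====

-- B replaces A's quadratic pop/insert list simulation by a linear backward recurrence
-- on the surviving index (A mutates arr in place; the claim is about the return value).


-- ===== PORT A =====
-- the while loop: state = (arr, cur); fuel only makes the recursion structural; none = a raise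
def rotateDeleteLoop (n : Int) (arr : List Int) (cur : Int) (fuel : Nat) : Option (List Int) :=
  match fuel with
  | 0 => some arr
  | f + 1 =>
    if cur < PySem.Int.floordiv n 2 + 1 then
      match PySem.List.pop? arr (-1) with        -- temp = arr.pop()
      | none => none
      | some (temp, arr1) =>
        let arr2 := PySem.List.insert arr1 0 temp -- arr.insert(0, temp)
        match PySem.List.pop? arr2 (-cur) with    -- arr.pop(-cur)
        | none => none
        | some (_, arr3) => rotateDeleteLoop n arr3 (cur + 1) f
    else some arr

def rotateDelete (arr : List Int) : Int :=
  let n : Int := arr.length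
  match rotateDeleteLoop n arr 1 arr.length with
  | none => 0
  | some a => (PySem.List.pyGet? a 0).getD 0      -- return arr[0]

-- ===== PORT B =====
def rotateDelete_alt (arr : List Int) : Int :=
  let n : Int := arr.length
  let p : Int := (PySem.List.pyRange (PySem.Int.floordiv n 2) 0 (-1)).foldl
      (fun p cur => if p = 0 then n - cur else if p ≤ n - 2 * cur then p - 1 else p) 0
  (PySem.List.pyGet? arr p).getD 0                -- return arr[p]

-- ===== PRECONDITION & SPEC =====
-- A raises IndexError (arr[0] on the empty list) iff arr = []; nothing else raises.
def Pre_rotateDelete (arr : List Int) : Prop := arr ≠ []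
instance (arr : List Int) : Decidable (Pre_rotateDelete arr) := by unfold Pre_rotateDelete; infer_instance
def pvWitness_rotateDelete : List Int := [3, 1, 4, 1, 5]

def Spec_rotateDelete (arr : List Int) (out : Int) : Prop := out = rotateDelete_alt arr
instance (arr : List Int) (out : Int) : Decidable (Spec_rotateDelete arr out) := by unfold Spec_rotateDelete; infer_instance

-- ===== CLAIM (what is proved, stated in full; the proofs are below) =====
def Claim_equal_rotateDelete : Prop := ∀ (arr : List Int), Dom_rotateDelete arr → Pre_rotateDelete arr → Spec_rotateDelete arr (rotateDelete arr)

-- ===== LEMMAS AND PROOFS =====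

-- the surviving position before step `cur` (steps cur..m remaining), computed backwards
def survPos (n m cur : Nat) : Nat :=
  if cur ≤ m then
    let i := survPos n m (cur + 1)
    if i = 0 then n - cur else if i ≤ n - 2 * cur then i - 1 else i
  else 0
termination_by m + 1 - cur

theorem survPos_stop (n m cur : Nat) (h : m < cur) : survPos n m cur = 0 := by
  unfold survPos; simp [Nat.not_le.mpr h]

theorem survPos_step (n m cur : Nat) (h : cur ≤ m) :
    survPos n m cur =
      (let i := survPos n m (cur + 1);
       if i = 0 then n - cur else if i ≤ n - 2 * cur then i - 1 else i) := by
  conv_lhs => rw [survPos]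
  simp [h]

theorem survPos_le (n m : Nat) (hm : 2 * m ≤ n) :
    ∀ k cur, m + 1 ≤ cur + k → survPos n m cur ≤ n - cur := by
  intro k
  induction k with
  | zero => intro cur hc; rw [survPos_stop n m cur (by omega)]; omega
  | succ k ih =>
    intro cur hc
    by_cases h : cur ≤ m
    · rw [survPos_step n m cur h]
      have := ih (cur + 1) (by omega)
      simp only []
      split_ifs <;> omega
    · rw [survPos_stop n m cur (by omega)]; omega

-- pop? at a negative in-range index
theorem pop?_neg_nat {α : Type} (xs : List α) (c : Nat) (h1 : 0 < c) (h2 : c ≤ xs.length) :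
    PySem.List.pop? xs (-(c : Int)) =
      (xs[xs.length - c]?).map (fun x => (x, xs.eraseIdx (xs.length - c))) := by
  simp only [PySem.List.pop?, PySem.List.pyIdx?]
  have hneg : ¬ (0 ≤ -(c : Int)) := by omega
  rw [if_neg hneg, if_pos (by omega)]
  simp [Option.map]

-- one loop iteration, characterised on indices: for a state xs of length L = n + 1 - cur
-- (1 ≤ cur ≤ m = n/2) the new state ys satisfies ys[i'] = xs[φ(i')]
theorem loopA_main (n m : Nat) (hm : m = n / 2) :
    ∀ (fuel : Nat) (cur : Nat) (xs : List Int), 1 ≤ cur → cur ≤ m + 1 →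
      xs.length + cur = n + 1 → m + 1 - cur ≤ fuel →
      ∃ ys, rotateDeleteLoop (n : Int) xs (cur : Int) fuel = some ys ∧
            ys[0]? = xs[survPos n m cur]? := by
  intro fuel
  induction fuel with
  | zero =>
    intro cur xs h1 h2 h3 hf
    have hcur : cur = m + 1 := by omega
    refine ⟨xs, rfl, ?_⟩
    rw [hcur, survPos_stop n m (m + 1) (by omega)]
  | succ f ih =>
    intro cur xs h1 h2 h3 hf
    by_cases hlt : cur ≤ m
    · -- loop body runs
      have hn2 : 2 * m ≤ n := by omega
      have hL : xs.length = n + 1 - cur := by omega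
      have hL2 : 2 ≤ xs.length := by omega
      -- xs = init ++ [last]
      obtain ⟨ys0, lastx, hsplit⟩ : ∃ ys0 lastx, xs = ys0 ++ [lastx] := by
        rcases List.eq_nil_or_concat xs with h | ⟨ys0, lastx, h⟩
        · simp [h] at hL2
        · exact ⟨ys0, lastx, by simpa using h⟩
      have hy0len : ys0.length + 1 = xs.length := by rw [hsplit]; simp
      -- the rotated list
      set arr2 := lastx :: ys0 with harr2
      have harr2len : arr2.length = xs.length := by simp [harr2]; omega
      have hcond : (cur : Int) < PySem.Int.floordiv (n : Int) 2 + 1 := by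
        have : PySem.Int.floordiv (n : Int) 2 = ((n / 2 : Nat) : Int) :=
          PySem.Int.floordiv_natCast n 2
        rw [this]; push_cast; omega
      have hpop1 : PySem.List.pop? xs (-1 : Int) = some (lastx, ys0) := by
        rw [hsplit]; exact PySem.List.pop?_last ys0 lastx
      -- the second pop: index L - cur from the front
      have hidx : arr2.length - cur < arr2.length := by omega
      have hpop2 : PySem.List.pop? arr2 (-(cur : Int)) =
          some (arr2[arr2.length - cur], arr2.eraseIdx (arr2.length - cur)) := by
        rw [pop?_neg_nat arr2 cur (by omega) (by omega)]
        rw [List.getElem?_eq_getElem hidx]; rfl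
      set arr3 := arr2.eraseIdx (arr2.length - cur) with harr3
      have harr3len : arr3.length + (cur + 1) = n + 1 := by
        have := List.length_eraseIdx_of_lt hidx
        rw [harr3, this]; omega
      obtain ⟨ys, hys, hys0⟩ := ih (cur + 1) arr3 (by omega) (by omega) harr3len (by omega)
      refine ⟨ys, ?_, ?_⟩
      · unfold rotateDeleteLoop
        rw [if_pos hcond, hpop1]
        simp only [PySem.List.insert_zero, ← harr2]
        rw [hpop2]
        show rotateDeleteLoop (n : Int) arr3 ((cur : Int) + 1) f = some ys
        have hc1 : ((cur : Int) + 1) = ((cur + 1 : Nat) : Int) := by push_cast; ring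
        rw [hc1]; exact hys
      · rw [hys0]
        -- index bookkeeping: arr3[i]? = xs[survPos n m cur]?
        set i := survPos n m (cur + 1) with hi
        have hile : i ≤ n - (cur + 1) :=
          survPos_le n m hn2 (m + 1) (cur + 1) (by omega)
        have hd : arr2.length - cur = xs.length - cur := by omega
        have hScur : survPos n m cur =
            if i = 0 then n - cur else if i ≤ n - 2 * cur then i - 1 else i :=
          survPos_step n m cur hlt
        rw [harr3, List.getElem?_eraseIdx]
        by_cases hi0 : i = 0
        · -- survivor is the freshly rotated last element
          rw [hScur, if_pos hi0, hi0]
          rw [if_pos (by omega)]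
          have : xs[n - cur]? = some lastx := by
            rw [hsplit, List.getElem?_append_right (by omega)]
            have : n - cur - ys0.length = 0 := by omega
            rw [this]; rfl
          simp [harr2, this]
        · by_cases hi1 : i ≤ n - 2 * cur
          · -- survivor sits left of the deleted index: shift by the head insertion
            rw [hScur, if_neg hi0, if_pos hi1]
            rw [if_pos (by omega)]
            have h1i : 1 ≤ i := by omega
            have : arr2[i]? = ys0[i - 1]? := by
              rw [harr2]
              rcases Nat.exists_eq_add_of_le h1i with ⟨j, hj⟩
              rw [hj, Nat.add_comm 1 j]
              simp
            rw [this, hsplit, List.getElem?_append_left (by omega)]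
          · -- survivor sits right of the deleted index
            rw [hScur, if_neg hi0, if_neg hi1]
            rw [if_neg (by omega)]
            have : arr2[i + 1]? = ys0[i]? := by
              rw [harr2]; simp
            rw [this, hsplit, List.getElem?_append_left (by omega)]
    · -- loop exits
      have hcur : cur = m + 1 := by omega
      refine ⟨xs, ?_, ?_⟩
      · unfold rotateDeleteLoop
        rw [if_neg ?_]
        have : PySem.Int.floordiv (n : Int) 2 = ((n / 2 : Nat) : Int) :=
          PySem.Int.floordiv_natCast n 2
        rw [this]; omega
      · rw [hcur, survPos_stop n m (m + 1) (by omega)]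

-- B's fold computes survPos n m 1
theorem foldB_eq (n m : Nat) (hn2 : 2 * m ≤ n) :
    ∀ c : Nat, c ≤ m →
      (PySem.List.pyRange (c : Int) 0 (-1)).foldl
        (fun p cur => if p = 0 then (n : Int) - cur
                      else if p ≤ (n : Int) - 2 * cur then p - 1 else p)
        ((survPos n m (c + 1) : Nat) : Int)
      = ((survPos n m 1 : Nat) : Int) := by
  intro c
  induction c with
  | zero =>
    intro _
    rw [PySem.List.pyRange_neg_one_eq_nil (by omega)]
    rfl
  | succ c ih =>
    intro hc
    rw [PySem.List.pyRange_neg_one_cons (by push_cast; omega), List.foldl_cons]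
    have ht : ((c + 1 : Nat) : Int) - 1 = (c : Int) := by push_cast; ring
    rw [ht, ← ih (by omega)]
    congr 1
    rw [survPos_step n m (c + 1) (by omega)]
    simp only []
    split_ifs <;> omega

-- ===== VERDICT (by name: the statement is the Claim_ definition above) =====
theorem rotateDelete_spec : Claim_equal_rotateDelete := by
  unfold Claim_equal_rotateDelete
  intro arr _ hpre
  unfold Spec_rotateDelete
  set n := arr.length with hn
  have hn1 : 1 ≤ n := by
    rw [hn]; exact List.length_pos_iff.mpr hpre
  set m := n / 2 with hm
  obtain ⟨ys, hys, hys0⟩ :=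
    loopA_main n m hm arr.length 1 arr (le_refl 1) (by omega) (by omega) (by omega)
  have hB : rotateDelete_alt arr = (arr[survPos n m 1]?).getD 0 := by
    unfold rotateDelete_alt
    simp only []
    have hfd : PySem.Int.floordiv ((arr.length : Int)) 2 = ((m : Nat) : Int) := by
      rw [← hn, hm]; exact_mod_cast PySem.Int.floordiv_natCast n 2
    rw [hfd]
    have := foldB_eq n m (by omega) m (le_refl m)
    rw [survPos_stop n m (m + 1) (by omega)] at this
    norm_num at this ⊢
    rw [← hn, this, PySem.List.pyGet?_natCast]
  rw [hB]
  unfold rotateDelete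
  norm_num at hys
  simp only [← hn] at hys ⊢
  rw [hys]
  show (PySem.List.pyGet? ys 0).getD 0 = arr[survPos n m 1]?.getD 0
  rw [PySem.List.pyGet?_zero, hys0]
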